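-- pv_equiv track=rewrite | github.com/pinax/cloudspotting2 | cloudspotting2/context_processors.py | package_names
-- ===== SOURCE A (Python) =====
-- def transform_package_name(name):
--     if name.startswith("pinax."):
--         return name.replace(".", "-")
--     elif name == "account":
--         return "django-user-accounts"
--     elif name == "mailer":
--         return "django-mailer"
--     else:
--         return name
--
-- def package_names(names):
--     """
--     Returns list of names sorted by core_apps first, then alphabetical order
--     """
--     core_apps = ["pinax.templates", "account", "pinax.eventlog", "pinax.webanalytics"]
--     apps = []
--     for x in names:
--         if x in core_apps:
--             index = core_apps.index(x)
--         else:
--             index = 55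
--         # add to decorated list
--         apps.append((index, transform_package_name(x)))
--
--     # sort apps
--     apps.sort()
--
--     # undecorate
--     return [x[1] for x in apps]
-- ===== SOURCE B (Python) =====
-- def transform_package_name(name):
--     if name.startswith("pinax."):
--         return name.replace(".", "-")
--     elif name == "account":
--         return "django-user-accounts"
--     elif name == "mailer":
--         return "django-mailer"
--     else:
--         return name
--
-- def package_names(names):
--     """
--     Core apps (in their fixed order, with duplicate counts preserved) first,
--     then the remaining names sorted by their transformed name.
--     """
--     core_apps = ["pinax.templates", "account", "pinax.eventlog", "pinax.webanalytics"]
--     core = [x for x in names if x in core_apps]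
--     noncore = [x for x in names if x not in core_apps]
--     result = []
--     for c in core_apps:
--         result += [transform_package_name(c)] * core.count(c)
--     return result + sorted(transform_package_name(x) for x in noncore)
-- ===== Notes on version B (the rewrite author's own statement) =====
-- stated objective: simpler
-- what changed: Replaces A's decorate-with-priority/sort-tuples/undecorate pipeline by a partition: core names are emitted by walking the fixed core_apps list (duplicate counts preserved via count), and only the transformed non-core names are sorted.
import Mathlib
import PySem

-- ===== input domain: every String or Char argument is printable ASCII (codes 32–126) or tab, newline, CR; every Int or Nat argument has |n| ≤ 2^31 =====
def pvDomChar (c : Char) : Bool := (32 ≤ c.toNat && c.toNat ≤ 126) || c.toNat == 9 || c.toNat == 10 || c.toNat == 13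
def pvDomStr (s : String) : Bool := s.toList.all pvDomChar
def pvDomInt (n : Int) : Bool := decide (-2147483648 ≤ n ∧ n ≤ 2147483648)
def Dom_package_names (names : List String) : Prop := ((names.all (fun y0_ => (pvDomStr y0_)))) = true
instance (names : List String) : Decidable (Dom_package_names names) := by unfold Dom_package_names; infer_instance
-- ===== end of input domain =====

-- B partitions names into core/non-core, emits the core apps in their fixed order and the
-- rest as one sort of the transformed names — simpler: no decorate/sort/undecorate dance.

-- shared module-level helpers (identical code in Source A and Source B)
def transformPkg (name : String) : String :=
  if PySem.Str.startswith name "pinax." then PySem.Str.replace name "." "-"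
  else if name == "account" then "django-user-accounts"
  else if name == "mailer" then "django-mailer"
  else name

def coreAppsList : List String :=
  ["pinax.templates", "account", "pinax.eventlog", "pinax.webanalytics"]

-- ===== PORT A =====
def package_names (names : List String) : List String :=
  let apps : List (Int × String) := names.foldl (fun apps x =>
    let index : Int :=
      if coreAppsList.contains x then
        ((PySem.List.index? coreAppsList x).getD 0 : Nat)  -- .index guarded by the membership test
      else 55
    apps ++ [(index, transformPkg x)]) []
  let sortedApps := PySem.List.sorted2 apps (fun p => p.1) (fun p => p.2) false
  sortedApps.map (fun p => p.2)

-- ===== PORT B =====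
def package_names_alt (names : List String) : List String :=
  let core := names.filter (fun x => coreAppsList.contains x)
  let noncore := names.filter (fun x => !coreAppsList.contains x)
  let result := coreAppsList.foldl
    (fun acc c => acc ++ List.replicate (core.count c) (transformPkg c)) []
  result ++ PySem.List.sorted (noncore.map transformPkg) (fun s => s) false

-- ===== PRECONDITION & SPEC =====
def Spec_package_names (names : List String) (out : List String) : Prop := out = package_names_alt names
instance (names : List String) (out : List String) : Decidable (Spec_package_names names out) := by unfold Spec_package_names; infer_instance

-- ===== CLAIM (what is proved, stated in full; the proofs are below) =====
def Claim_equal_package_names : Prop := ∀ (names : List String), Dom_package_names names → Spec_package_names names (package_names names)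

-- ===== LEMMAS AND PROOFS =====

-- A's priority index as a plain function of the name
def pvIdx (x : String) : Int :=
  if x = "pinax.templates" then 0 else if x = "account" then 1
  else if x = "pinax.eventlog" then 2 else if x = "pinax.webanalytics" then 3 else 55

-- the lexicographic tuple comparison `sorted2` uses on (index, transformed name)
def pvLt (a b : Int × String) : Bool :=
  decide (a.1 < b.1) || (!decide (b.1 < a.1) && decide (a.2 < b.2))

-- transformed non-core names, in input order
def pvNC (ns : List String) : List String :=
  (ns.filter (fun x => !coreAppsList.contains x)).map transformPkg

-- the shape of A's sorted decorated list: one block per core app, then the non-core tail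
def pvSt (ns : List String) : List (Int × String) :=
  List.replicate (ns.count "pinax.templates") ((0:Int), "pinax-templates") ++
  (List.replicate (ns.count "account") ((1:Int), "django-user-accounts") ++
  (List.replicate (ns.count "pinax.eventlog") ((2:Int), "pinax-eventlog") ++
  (List.replicate (ns.count "pinax.webanalytics") ((3:Int), "pinax-webanalytics") ++
  (PySem.List.sorted (pvNC ns) (fun s => s) false).map (fun s => ((55:Int), s)))))

theorem sorted2_eq_foldl (xs : List (Int × String)) :
    PySem.List.sorted2 xs (fun p => p.1) (fun p => p.2) false =
      xs.foldl (fun acc x => PySem.List.insertBy pvLt x acc) [] := rfl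

theorem insertBy_append_not {α : Type} (before : α → α → Bool) (x : α) (l r : List α)
    (h : ∀ y ∈ l, before x y = false) :
    PySem.List.insertBy before x (l ++ r) = l ++ PySem.List.insertBy before x r := by
  induction l with
  | nil => rfl
  | cons a t ih =>
    simp only [List.cons_append, PySem.List.insertBy, h a (by simp)]
    simp only [Bool.false_eq_true, if_false, List.cons.injEq, true_and]
    exact ih (fun y hy => h y (by simp [hy]))

theorem insertBy_all_before {α : Type} (before : α → α → Bool) (x : α) (r : List α)
    (h : ∀ y ∈ r, before x y = true) :
    PySem.List.insertBy before x r = x :: r := by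
  cases r with
  | nil => rfl
  | cons a t => simp [PySem.List.insertBy, h a (by simp)]

theorem insertBy_map55 (s : String) (S : List String) :
    PySem.List.insertBy pvLt ((55:Int), s) (S.map (fun t => ((55:Int), t))) =
      (PySem.List.insertBy (fun a b => decide (a < b)) s S).map (fun t => ((55:Int), t)) := by
  induction S with
  | nil => rfl
  | cons a t ih =>
    by_cases h : s < a
    · simp [PySem.List.insertBy, pvLt, h]
    · simp [PySem.List.insertBy, pvLt, h, ih]

theorem dec_eq (x : String) :
    (if coreAppsList.contains x then (((PySem.List.index? coreAppsList x).getD 0 : Nat) : Int) else 55)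
      = pvIdx x := by
  by_cases h0 : x = "pinax.templates"
  · subst h0; decide
  by_cases h1 : x = "account"
  · subst h1; decide
  by_cases h2 : x = "pinax.eventlog"
  · subst h2; decide
  by_cases h3 : x = "pinax.webanalytics"
  · subst h3; decide
  have hc : coreAppsList.contains x = false := by
    simp [coreAppsList, h0, h1, h2, h3]
  rw [hc]
  simp [pvIdx, h0, h1, h2, h3]

theorem mem_map55 {y : Int × String} {S : List String}
    (h : y ∈ S.map (fun t => ((55:Int), t))) : y.1 = 55 := by
  obtain ⟨t, _, rfl⟩ := List.mem_map.mp h; rfl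

-- A's insertion sort, run over the decorated names, produces exactly the block shape pvSt
theorem foldl_ins_eq_st (ns : List String) :
    (ns.map (fun x => (pvIdx x, transformPkg x))).foldl
        (fun acc x => PySem.List.insertBy pvLt x acc) [] = pvSt ns := by
  induction ns using List.reverseRecOn with
  | nil => rfl
  | append_singleton ns x ih =>
    rw [List.map_append, List.foldl_append, ih]
    simp only [List.map_cons, List.map_nil, List.foldl_cons, List.foldl_nil]
    by_cases h0 : x = "pinax.templates"
    · subst h0
      show PySem.List.insertBy pvLt ((0:Int), "pinax-templates") (pvSt ns) = _
      unfold pvSt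
      rw [insertBy_append_not _ _ _ _ (by
        intro y hy; rw [List.eq_of_mem_replicate hy]; simp [pvLt])]
      rw [insertBy_all_before _ _ _ (by
        intro y hy
        simp only [List.mem_append] at hy
        rcases hy with (hy | hy | hy | hy)
        · rw [List.eq_of_mem_replicate hy]; simp [pvLt]
        · rw [List.eq_of_mem_replicate hy]; simp [pvLt]
        · rw [List.eq_of_mem_replicate hy]; simp [pvLt]
        · have := mem_map55 hy; simp [pvLt, this])]
      simp [pvNC, List.count_append, List.replicate_succ', coreAppsList]
    by_cases h1 : x = "account"
    · subst h1
      show PySem.List.insertBy pvLt ((1:Int), "django-user-accounts") (pvSt ns) = _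
      unfold pvSt
      rw [insertBy_append_not _ _ _ _ (by
            intro y hy; rw [List.eq_of_mem_replicate hy]; simp [pvLt]),
          insertBy_append_not _ _ _ _ (by
            intro y hy; rw [List.eq_of_mem_replicate hy]; simp [pvLt]),
          insertBy_all_before _ _ _ (by
            intro y hy
            simp only [List.mem_append] at hy
            rcases hy with (hy | hy | hy)
            · rw [List.eq_of_mem_replicate hy]; simp [pvLt]
            · rw [List.eq_of_mem_replicate hy]; simp [pvLt]
            · have := mem_map55 hy; simp [pvLt, this])]
      simp [pvNC, List.count_append, List.replicate_succ', coreAppsList]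
    by_cases h2 : x = "pinax.eventlog"
    · subst h2
      show PySem.List.insertBy pvLt ((2:Int), "pinax-eventlog") (pvSt ns) = _
      unfold pvSt
      rw [insertBy_append_not _ _ _ _ (by
            intro y hy; rw [List.eq_of_mem_replicate hy]; simp [pvLt]),
          insertBy_append_not _ _ _ _ (by
            intro y hy; rw [List.eq_of_mem_replicate hy]; simp [pvLt]),
          insertBy_append_not _ _ _ _ (by
            intro y hy; rw [List.eq_of_mem_replicate hy]; simp [pvLt]),
          insertBy_all_before _ _ _ (by
            intro y hy
            simp only [List.mem_append] at hy
            rcases hy with (hy | hy)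
            · rw [List.eq_of_mem_replicate hy]; simp [pvLt]
            · have := mem_map55 hy; simp [pvLt, this])]
      simp [pvNC, List.count_append, List.replicate_succ', coreAppsList]
    by_cases h3 : x = "pinax.webanalytics"
    · subst h3
      show PySem.List.insertBy pvLt ((3:Int), "pinax-webanalytics") (pvSt ns) = _
      unfold pvSt
      rw [insertBy_append_not _ _ _ _ (by
            intro y hy; rw [List.eq_of_mem_replicate hy]; simp [pvLt]),
          insertBy_append_not _ _ _ _ (by
            intro y hy; rw [List.eq_of_mem_replicate hy]; simp [pvLt]),
          insertBy_append_not _ _ _ _ (by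
            intro y hy; rw [List.eq_of_mem_replicate hy]; simp [pvLt]),
          insertBy_append_not _ _ _ _ (by
            intro y hy; rw [List.eq_of_mem_replicate hy]; simp [pvLt]),
          insertBy_all_before _ _ _ (by
            intro y hy
            have := mem_map55 hy; simp [pvLt, this])]
      simp [pvNC, List.count_append, List.replicate_succ', coreAppsList]
    -- non-core x
    have hidx : pvIdx x = 55 := by simp [pvIdx, h0, h1, h2, h3]
    rw [hidx]
    unfold pvSt
    rw [insertBy_append_not _ _ _ _ (by
          intro y hy; rw [List.eq_of_mem_replicate hy]; simp [pvLt]),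
        insertBy_append_not _ _ _ _ (by
          intro y hy; rw [List.eq_of_mem_replicate hy]; simp [pvLt]),
        insertBy_append_not _ _ _ _ (by
          intro y hy; rw [List.eq_of_mem_replicate hy]; simp [pvLt]),
        insertBy_append_not _ _ _ _ (by
          intro y hy; rw [List.eq_of_mem_replicate hy]; simp [pvLt]),
        insertBy_map55]
    have hmem : x ∉ coreAppsList := by simp [coreAppsList, h0, h1, h2, h3]
    have hnc : pvNC (ns ++ [x]) = pvNC ns ++ [transformPkg x] := by
      simp [pvNC, List.filter_append, hmem]
    rw [hnc, PySem.List.sorted_eq_foldl_insertBy (pvNC ns ++ [transformPkg x]),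
        List.foldl_append, ← PySem.List.sorted_eq_foldl_insertBy]
    simp [List.count_append, h0, h1, h2, h3]

theorem count_filter_core (names : List String) (c : String) (hcc : coreAppsList.contains c = true) :
    (names.filter (fun x => coreAppsList.contains x)).count c = names.count c := by
  induction names with
  | nil => rfl
  | cons a t ih =>
    by_cases ha : coreAppsList.contains a
    · simp only [List.filter_cons, ha, if_true, List.count_cons, ih]
    · simp only [List.filter_cons, ha, Bool.false_eq_true, if_false, List.count_cons, ih]
      have : ¬ a = c := fun h => by subst h; exact ha hcc
      simp [this]

theorem pkg_eq (names : List String) : package_names names = package_names_alt names := by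
  unfold package_names package_names_alt
  have hmap : names.foldl (fun apps x =>
      apps ++ [((if coreAppsList.contains x then
          (((PySem.List.index? coreAppsList x).getD 0 : Nat) : Int) else 55), transformPkg x)]) []
      = names.map (fun x => (pvIdx x, transformPkg x)) := by
    rw [PySem.List.foldl_append_singleton_eq_map]
    exact List.map_congr_left (fun x _ => by rw [dec_eq])
  simp only [hmap, sorted2_eq_foldl, foldl_ins_eq_st]
  have hfold : ∀ core : List String,
      coreAppsList.foldl (fun acc c => acc ++ List.replicate (core.count c) (transformPkg c)) []
        = List.replicate (core.count "pinax.templates") "pinax-templates" ++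
          List.replicate (core.count "account") "django-user-accounts" ++
          List.replicate (core.count "pinax.eventlog") "pinax-eventlog" ++
          List.replicate (core.count "pinax.webanalytics") "pinax-webanalytics" := by
    intro core
    rfl
  rw [hfold, count_filter_core _ _ (by decide), count_filter_core _ _ (by decide),
      count_filter_core _ _ (by decide), count_filter_core _ _ (by decide)]
  simp [pvSt, pvNC, List.map_replicate, List.map_map]

-- ===== VERDICT (by name: the statement is the Claim_ definition above) =====
theorem package_names_spec : Claim_equal_package_names := by
  intro names _
  exact pkg_eq names
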